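-- pv_equiv track=rewrite | github.com/Pradeepsingh61/DSA_Code | Python/algorithms/backtracking/generate_permutations.py | permute_with_repetition
-- ===== SOURCE A (Python) =====
-- def permute_with_repetition(elements, length):
--     """
--     Generate all permutations with repetition allowed.
--
--     Args:
--         elements: List of available elements
--         length: Length of each permutation
--
--     Returns:
--         list: List of all permutations with repetition
--     """
--     result = []
--
--     def backtrack(current_permutation):
--         """Backtracking with repetition."""
--         if len(current_permutation) == length:
--             result.append(current_permutation[:])
--             return
--
--         for element in elements:
--             # Make choice (repetition allowed)
--             current_permutation.append(element)
--
--             # Recursive call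
--             backtrack(current_permutation)
--
--             # Backtrack
--             current_permutation.pop()
--
--     backtrack([])
--     return result
-- ===== SOURCE B (Python) =====
-- def permute_with_repetition(elements, length):
--     """Iterative product build: grow a frontier of partial permutations."""
--     result = [[]]
--     for _ in range(length):
--         result = [r + [e] for r in result for e in elements]
--     return result
-- ===== Notes on version B (the rewrite author's own statement) =====
-- stated objective: simpler
-- what changed: Replaced the recursive backtracking with a mutable buffer by an iterative product build that grows a frontier of partial permutations, one comprehension per level.
-- outside the precondition, e.g. on permute_with_repetition([], -1): A returns [], B returns [[]]
import Mathlib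
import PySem

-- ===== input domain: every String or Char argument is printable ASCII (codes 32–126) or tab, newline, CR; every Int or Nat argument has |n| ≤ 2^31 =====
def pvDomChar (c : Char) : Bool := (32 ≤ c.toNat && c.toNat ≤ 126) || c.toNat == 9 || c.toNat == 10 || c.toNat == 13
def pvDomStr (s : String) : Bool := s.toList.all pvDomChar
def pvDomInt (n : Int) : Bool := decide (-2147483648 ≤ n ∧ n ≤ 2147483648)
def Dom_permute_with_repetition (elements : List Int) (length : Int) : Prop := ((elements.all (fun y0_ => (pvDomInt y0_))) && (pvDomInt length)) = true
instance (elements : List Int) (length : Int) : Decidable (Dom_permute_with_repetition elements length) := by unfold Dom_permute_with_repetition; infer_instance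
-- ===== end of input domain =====

-- B replaces A's recursive backtracking by an iterative product build (simpler decomposition);
-- equivalence is about the return value only (A mutates only its local buffer, so no caller-visible mutation).

-- ===== PORT A =====
-- backtrack(current): append a snapshot once length is reached, else branch on each element.
-- The fuel argument bounds Python's recursion depth; inside Pre_ (0 ≤ length) the initial fuel
-- length.toNat is exactly enough, so fuel exhaustion is never reached where Python returns.
def pwrBacktrack (elements : List Int) (length : Int) (fuel : Nat)
    (current : List Int) (result : List (List Int)) : List (List Int) :=
  if (current.length : Int) = length then result ++ [current]
  else
    match fuel with
    | 0 => result  -- Python diverges here (recursion never bottoms out); unreachable under Pre_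
    | fuel + 1 =>
        elements.foldl (fun res e => pwrBacktrack elements length fuel (current ++ [e]) res) result

def permute_with_repetition (elements : List Int) (length : Int) : List (List Int) :=
  pwrBacktrack elements length length.toNat [] []

-- ===== PORT B =====
-- result = [[]]; for _ in range(length): result = [r + [e] for r in result for e in elements]
def permute_with_repetition_alt (elements : List Int) (length : Int) : List (List Int) :=
  (List.range length.toNat).foldl
    (fun result _ => result.flatMap (fun r => elements.map (fun e => r ++ [e]))) [[]]

-- ===== PRECONDITION & SPEC =====
-- Pre_ excludes negative lengths: with nonempty elements A raises RecursionError there, and with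
-- empty elements A's [] vs B's [[]] are both defensible answers for a nonsensical negative length.
def Pre_permute_with_repetition (elements : List Int) (length : Int) : Prop := 0 ≤ length
instance (elements : List Int) (length : Int) : Decidable (Pre_permute_with_repetition elements length) := by unfold Pre_permute_with_repetition; infer_instance
def pvWitness_permute_with_repetition : List Int × Int := ([1, 2], 2)


def Spec_permute_with_repetition (elements : List Int) (length : Int) (out : List (List Int)) : Prop := out = permute_with_repetition_alt elements length
instance (elements : List Int) (length : Int) (out : List (List Int)) : Decidable (Spec_permute_with_repetition elements length out) := by unfold Spec_permute_with_repetition; infer_instance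

-- ===== CLAIM (what is proved, stated in full; the proofs are below) =====
def Claim_equal_permute_with_repetition : Prop := ∀ (elements : List Int) (length : Int), Dom_permute_with_repetition elements length → Pre_permute_with_repetition elements length → Spec_permute_with_repetition elements length (permute_with_repetition elements length)

-- ===== LEMMAS AND PROOFS =====

-- the tree of extensions of `cur` by exactly k further elements, in A's (lexicographic) order
def pwrExt (elements : List Int) (k : Nat) (cur : List Int) : List (List Int) :=
  match k with
  | 0 => [cur]
  | k + 1 => elements.flatMap (fun e => pwrExt elements k (cur ++ [e]))

-- A's backtracking appends exactly the k-level extension tree after `result`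
theorem pwrBacktrack_eq_ext (elements : List Int) (length : Int) :
    ∀ (k fuel : Nat) (cur : List Int) (result : List (List Int)),
      (cur.length : Int) + k = length → k ≤ fuel →
      pwrBacktrack elements length fuel cur result = result ++ pwrExt elements k cur := by
  intro k
  induction k with
  | zero =>
      intro fuel cur result hlen _
      unfold pwrBacktrack
      simp only [pwrExt]
      rw [if_pos (by omega)]
  | succ k ih =>
      intro fuel cur result hlen hfuel
      obtain ⟨f, rfl⟩ : ∃ f, fuel = f + 1 := ⟨fuel - 1, by omega⟩
      unfold pwrBacktrack
      rw [if_neg (by omega)]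
      simp only [pwrExt]
      -- inner induction over the elements list
      suffices h : ∀ (es : List Int) (res : List (List Int)),
          es.foldl (fun res e => pwrBacktrack elements length f (cur ++ [e]) res) res
            = res ++ es.flatMap (fun e => pwrExt elements k (cur ++ [e])) by
        exact h elements result
      intro es
      induction es with
      | nil => intro res; simp
      | cons e es ihes =>
          intro res
          simp only [List.foldl_cons, List.flatMap_cons]
          rw [ihes, ih f (cur ++ [e]) res (by simp; omega) (by omega)]
          simp

-- one product step applied to an extension tree pushes the step inside
theorem pwrExt_step (elements : List Int) :
    ∀ (k : Nat) (cur : List Int),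
      (pwrExt elements k cur).flatMap (fun r => elements.map (fun e => r ++ [e]))
        = pwrExt elements (k + 1) cur := by
  intro k
  induction k with
  | zero =>
      intro cur
      simp only [pwrExt, List.flatMap_cons, List.flatMap_nil, List.append_nil]
      induction elements with
      | nil => simp
      | cons a as ihe => simp_all
  | succ k ih =>
      intro cur
      simp only [pwrExt]
      rw [List.flatMap_assoc]
      exact List.flatMap_congr (fun e _ => ih (cur ++ [e]))

-- B's frontier loop computes the flatMapped extension trees of its start frontier
theorem pwrFold_eq_ext (elements : List Int) :
    ∀ (n : Nat) (L : List (List Int)),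
      (List.range n).foldl (fun result _ => result.flatMap (fun r => elements.map (fun e => r ++ [e]))) L
        = L.flatMap (pwrExt elements n) := by
  intro n
  induction n with
  | zero => intro L; simp [pwrExt]
  | succ n ih =>
      intro L
      rw [List.range_succ, List.foldl_append, ih]
      simp only [List.foldl_cons, List.foldl_nil]
      rw [List.flatMap_assoc]
      exact List.flatMap_congr (fun cur _ => pwrExt_step elements n cur)

-- ===== VERDICT (by name: the statement is the Claim_ definition above) =====
theorem permute_with_repetition_spec : Claim_equal_permute_with_repetition := by
  intro elements length _ hpre
  unfold Pre_permute_with_repetition at hpre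
  unfold Spec_permute_with_repetition permute_with_repetition permute_with_repetition_alt
  rw [pwrBacktrack_eq_ext elements length length.toNat length.toNat [] []
        (by simp; omega) (le_refl _),
      pwrFold_eq_ext]
  simp
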